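-- pv_equiv track=rewrite | github.com/anavp/Artificial-Intelligence-Spring-2022 | labs/lab2/dpll_helper.py | reevaluation
-- ===== SOURCE A (Python) =====
-- def reevaluation(sym, lines):
--     assert sym is not None and len(sym) > 0 and sym[0] != '!'
--     neg_sym = "!" + sym
--     value = None
--     for line in lines:
--         if sym in line:
--             # assert neg_sym not in line
--             if value is None:
--                 value = True
--                 continue
--             elif not value:
--                 return None
--         elif neg_sym in line:
--             # assert sym not in line
--             if value is None:
--                 value = False
--                 continue
--             elif value:
--                 return None
--     return value
-- ===== SOURCE B (Python) =====
-- def reevaluation(sym, lines):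
--     assert sym is not None and len(sym) > 0 and sym[0] != '!'
--     neg_sym = "!" + sym
--     has_pos = any(sym in line for line in lines)
--     has_neg = any(neg_sym in line and sym not in line for line in lines)
--     if has_pos and has_neg:
--         return None
--     if has_pos:
--         return True
--     if has_neg:
--         return False
--     return None
-- ===== Notes on version B (the rewrite author's own statement) =====
-- stated objective: simpler
-- what changed: Replaced the stateful early-exit loop over lines with two aggregate any() scans (has_pos, has_neg) followed by a four-way resolution; the 'sym not in line' guard in has_neg mirrors the original's elif priority.
import Mathlib
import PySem

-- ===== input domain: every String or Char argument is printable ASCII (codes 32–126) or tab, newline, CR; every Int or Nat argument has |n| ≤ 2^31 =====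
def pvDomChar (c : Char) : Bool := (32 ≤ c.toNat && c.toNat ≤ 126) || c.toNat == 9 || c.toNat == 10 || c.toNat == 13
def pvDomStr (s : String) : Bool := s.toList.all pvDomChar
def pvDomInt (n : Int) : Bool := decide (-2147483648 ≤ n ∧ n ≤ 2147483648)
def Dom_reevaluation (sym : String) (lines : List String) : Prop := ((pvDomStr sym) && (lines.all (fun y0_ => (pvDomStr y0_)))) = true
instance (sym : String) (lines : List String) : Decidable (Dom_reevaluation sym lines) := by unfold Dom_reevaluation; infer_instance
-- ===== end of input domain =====

-- B replaces A's stateful early-exit loop with two aggregate any-scans and a four-way resolution (objective: simpler).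


-- ===== PORT A =====
-- A's for-loop with mutable `value` and mid-loop `return None`; sym/neg_sym membership is
-- Python substring containment, ported via PySem.Chars.isIn on .toList.
def reevalLoopA (symL negL : List Char) (value : Option Bool) : List String → Option Bool
  | [] => value
  | line :: rest =>
    if PySem.Chars.isIn symL line.toList then
      match value with
      | none => reevalLoopA symL negL (some true) rest
      | some v => if !v then none else reevalLoopA symL negL (some v) rest
    else if PySem.Chars.isIn negL line.toList then
      match value with
      | none => reevalLoopA symL negL (some false) rest
      | some v => if v then none else reevalLoopA symL negL (some v) rest
    else reevalLoopA symL negL value rest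

def reevaluation (sym : String) (lines : List String) : Option Bool :=
  reevalLoopA sym.toList ('!' :: sym.toList) none lines

-- ===== PORT B =====
def reevaluation_alt (sym : String) (lines : List String) : Option Bool :=
  let symL := sym.toList
  let negL := '!' :: sym.toList
  let hasPos := lines.any (fun line => PySem.Chars.isIn symL line.toList)
  let hasNeg := lines.any (fun line =>
    PySem.Chars.isIn negL line.toList && !PySem.Chars.isIn symL line.toList)
  if hasPos && hasNeg then none
  else if hasPos then some true
  else if hasNeg then some false
  else none

-- ===== PRECONDITION & SPEC =====
-- Pre_ excludes exactly the inputs on which A's opening assert raises (empty sym or sym starting with '!').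
def Pre_reevaluation (sym : String) (lines : List String) : Prop :=
  sym.toList ≠ [] ∧ sym.toList.head? ≠ some '!'
instance (sym : String) (lines : List String) : Decidable (Pre_reevaluation sym lines) := by
  unfold Pre_reevaluation; infer_instance

def pvWitness_reevaluation : String × List String := ("p", ["p q", "!r s"])

def Spec_reevaluation (sym : String) (lines : List String) (out : Option Bool) : Prop := out = reevaluation_alt sym lines
instance (sym : String) (lines : List String) (out : Option Bool) : Decidable (Spec_reevaluation sym lines out) := by unfold Spec_reevaluation; infer_instance

-- ===== CLAIM (what is proved, stated in full; the proofs are below) =====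
def Claim_equal_reevaluation : Prop := ∀ (sym : String) (lines : List String), Dom_reevaluation sym lines → Pre_reevaluation sym lines → Spec_reevaluation sym lines (reevaluation sym lines)

-- ===== LEMMAS AND PROOFS =====

-- '!'++sym contains sym, so substring containment of negL implies that of symL.
lemma isIn_of_isIn_neg (s l : List Char) (h : PySem.Chars.isIn ('!' :: s) l = true) :
    PySem.Chars.isIn s l = true := by
  rw [PySem.Chars.isIn_iff_infix] at h ⊢
  exact List.IsInfix.trans (List.suffix_cons '!' s).isInfix h

lemma isIn_neg_false (s l : List Char) (h : PySem.Chars.isIn s l = false) :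
    PySem.Chars.isIn ('!' :: s) l = false := by
  cases hn : PySem.Chars.isIn ('!' :: s) l with
  | false => rfl
  | true => rw [isIn_of_isIn_neg s l hn] at h; exact h

lemma loopA_some_true (s : List Char) (lines : List String) :
    reevalLoopA s ('!' :: s) (some true) lines = some true := by
  induction lines with
  | nil => rfl
  | cons line rest ih =>
    by_cases h : PySem.Chars.isIn s line.toList = true
    · simp [reevalLoopA, h, ih]
    · have h' : PySem.Chars.isIn s line.toList = false := by simpa using h
      simp [reevalLoopA, h', isIn_neg_false s line.toList h', ih]

lemma loopA_none (s : List Char) (lines : List String) :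
    reevalLoopA s ('!' :: s) none lines =
      if lines.any (fun line => PySem.Chars.isIn s line.toList) then some true else none := by
  induction lines with
  | nil => rfl
  | cons line rest ih =>
    by_cases h : PySem.Chars.isIn s line.toList = true
    · simp [reevalLoopA, h, loopA_some_true]
    · have h' : PySem.Chars.isIn s line.toList = false := by simpa using h
      simp [reevalLoopA, h', isIn_neg_false s line.toList h', ih]

-- B's has_neg is always false: a line containing '!'++sym contains sym, so the guard kills every term.
lemma hasNeg_false (s : List Char) (lines : List String) :
    lines.any (fun line =>
      PySem.Chars.isIn ('!' :: s) line.toList && !PySem.Chars.isIn s line.toList) = false := by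
  simp only [List.any_eq_false]
  intro line _
  by_cases h : PySem.Chars.isIn s line.toList = true
  · simp [h]
  · have h' : PySem.Chars.isIn s line.toList = false := by simpa using h
    simp [isIn_neg_false s line.toList h']

-- ===== VERDICT (by name: the statement is the Claim_ definition above) =====
theorem reevaluation_spec : Claim_equal_reevaluation := by
  intro sym lines _ _
  unfold Spec_reevaluation reevaluation reevaluation_alt
  simp only []
  rw [loopA_none, hasNeg_false]
  by_cases h : lines.any (fun line => PySem.Chars.isIn sym.toList line.toList) = true <;>
    simp_all
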